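-- pv_equiv track=rewrite | github.com/MWest2020/Ops_to_Biz | audit/report_generation.py | _groepeer_bevindingen
-- ===== SOURCE A (Python) =====
-- from collections import defaultdict
--
-- VOLGORDE = {"NC": 0, "OFI": 1, "positief": 2}
--
-- def _groepeer_bevindingen(bevindingen: list[dict], norm_filter: str | None = None) -> str:
--     per_clausule: dict[str, list[dict]] = defaultdict(list)
--     for bev in bevindingen:
--         clausule = bev["clausule"]
--         if norm_filter == "9001" and not any(
--             clausule.startswith(str(c)) for c in range(4, 11)
--         ):
--             continue
--         if norm_filter == "27001" and any(
--             clausule.startswith(str(c)) for c in range(4, 11)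
--         ):
--             continue
--         per_clausule[clausule].append(bev)
--
--     regels = []
--     for clausule_id in sorted(per_clausule.keys()):
--         items = sorted(per_clausule[clausule_id], key=lambda b: VOLGORDE.get(b["classificatie"], 9))
--         regels.append(f"\nClausule {clausule_id}: {items[0]['clausule_titel']}\n")
--         for bev in items:
--             regels.append(
--                 f"  [{bev['classificatie']}] {bev['herkomst']} — "
--                 f"{bev['document_naam']}\n"
--                 f"  {bev['beschrijving']}\n"
--             )
--     return "".join(regels) if regels else "(Geen bevindingen voor deze norm)"
-- ===== SOURCE B (Python) =====
-- from itertools import groupby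
--
-- VOLGORDE = {"NC": 0, "OFI": 1, "positief": 2}
--
-- def _groepeer_bevindingen(bevindingen: list[dict], norm_filter: str | None = None) -> str:
--     def past(bev):
--         in_range = any(bev["clausule"].startswith(str(c)) for c in range(4, 11))
--         if norm_filter == "9001":
--             return in_range
--         if norm_filter == "27001":
--             return not in_range
--         return True
--
--     gesorteerd = sorted(
--         (b for b in bevindingen if past(b)),
--         key=lambda b: (b["clausule"], VOLGORDE.get(b["classificatie"], 9)),
--     )
--     regels = []
--     for clausule, groep in groupby(gesorteerd, key=lambda b: b["clausule"]):
--         items = list(groep)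
--         regels.append(f"\nClausule {clausule}: {items[0]['clausule_titel']}\n")
--         for bev in items:
--             regels.append(
--                 f"  [{bev['classificatie']}] {bev['herkomst']} — "
--                 f"{bev['document_naam']}\n"
--                 f"  {bev['beschrijving']}\n"
--             )
--     return "".join(regels) if regels else "(Geen bevindingen voor deze norm)"
-- ===== Notes on version B (the rewrite author's own statement) =====
-- stated objective: alternative
-- what changed: Replaces the defaultdict grouping pass plus a per-group sort with a single filter, one stable sort on the tuple key (clausule, volgorde), and an itertools.groupby over the resulting runs.
import Mathlib
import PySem

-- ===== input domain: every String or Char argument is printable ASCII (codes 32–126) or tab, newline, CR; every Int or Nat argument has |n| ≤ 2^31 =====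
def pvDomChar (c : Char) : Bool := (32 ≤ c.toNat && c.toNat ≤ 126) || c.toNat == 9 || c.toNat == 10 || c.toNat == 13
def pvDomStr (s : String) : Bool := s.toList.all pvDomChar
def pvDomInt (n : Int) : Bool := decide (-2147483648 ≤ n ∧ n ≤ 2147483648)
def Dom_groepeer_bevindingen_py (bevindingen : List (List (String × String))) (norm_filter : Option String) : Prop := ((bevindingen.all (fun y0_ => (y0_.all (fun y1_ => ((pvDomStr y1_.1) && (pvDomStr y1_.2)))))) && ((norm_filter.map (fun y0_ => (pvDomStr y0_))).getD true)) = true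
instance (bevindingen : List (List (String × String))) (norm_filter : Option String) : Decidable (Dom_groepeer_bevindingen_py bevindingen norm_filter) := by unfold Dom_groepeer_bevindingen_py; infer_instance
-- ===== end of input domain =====

-- B replaces A's defaultdict grouping + per-group sort by filter + ONE stable sort on the tuple key +
-- a groupby over runs (a different decomposition of the same task); the return value is proved equal on Pre_.

-- dict subscript on an input dict (association list, first match); "" only where Python raises KeyError
-- (such inputs are excluded by Pre_ below)
def dget (bev : List (String × String)) (k : String) : String :=
  ((bev.find? (fun p => p.1 == k)).map Prod.snd).getD ""

-- module-level constant shared by both Pythons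
def VOLGORDE : PySem.Dict String Int := PySem.Dict.ofList [("NC", 0), ("OFI", 1), ("positief", 2)]

-- ===== PORT A =====
-- any(clausule.startswith(str(c)) for c in range(4, 11))
def startsRangeA (cl : String) : Bool :=
  (PySem.List.pyRange 4 11 1).any (fun c => PySem.Str.startswith cl (PySem.Int.toStr c))

def lineA (bev : List (String × String)) : String :=
  "  [" ++ dget bev "classificatie" ++ "] " ++ dget bev "herkomst" ++ " — " ++
  dget bev "document_naam" ++ "\n" ++ "  " ++ dget bev "beschrijving" ++ "\n"

-- items[0] ported as pyGetD items 0 [] (items is never empty where this is reached)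
def headerA (cid : String) (items : List (List (String × String))) : String :=
  "\nClausule " ++ cid ++ ": " ++ dget (PySem.List.pyGetD items 0 []) "clausule_titel" ++ "\n"

def groepeer_bevindingen_py (bevindingen : List (List (String × String))) (norm_filter : Option String) : String :=
  let per : PySem.Dict String (List (List (String × String))) :=
    bevindingen.foldl (fun d bev =>
      let clausule := dget bev "clausule"
      if norm_filter == some "9001" && !(startsRangeA clausule) then d
      else if norm_filter == some "27001" && startsRangeA clausule then d
      else d.insert clausule (d.getD clausule [] ++ [bev])) PySem.Dict.empty
  let regels : List String :=
    (PySem.List.sorted per.keys (fun x => x) false).foldl (fun regels cid =>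
      let items := PySem.List.sorted (per.getD cid [])
        (fun b => VOLGORDE.getD (dget b "classificatie") 9) false
      let regels := regels ++ [headerA cid items]
      items.foldl (fun regels bev => regels ++ [lineA bev]) regels) []
  if regels == [] then "(Geen bevindingen voor deze norm)" else PySem.Str.join "" regels

-- ===== PORT B =====
def startsRangeB (cl : String) : Bool :=
  (PySem.List.pyRange 4 11 1).any (fun c => PySem.Str.startswith cl (PySem.Int.toStr c))

def keepB (norm_filter : Option String) (bev : List (String × String)) : Bool :=
  let in_range := startsRangeB (dget bev "clausule")
  if norm_filter == some "9001" then in_range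
  else if norm_filter == some "27001" then !in_range
  else true

def clB (bev : List (String × String)) : String := dget bev "clausule"

def volB (bev : List (String × String)) : Int := VOLGORDE.getD (dget bev "classificatie") 9

def lineB (bev : List (String × String)) : String :=
  "  [" ++ dget bev "classificatie" ++ "] " ++ dget bev "herkomst" ++ " — " ++
  dget bev "document_naam" ++ "\n" ++ "  " ++ dget bev "beschrijving" ++ "\n"

def headerB (cid : String) (first : List (String × String)) : String :=
  "\nClausule " ++ cid ++ ": " ++ dget first "clausule_titel" ++ "\n"

-- the groupby loop: one run of equal clausule keys at a time
def emitB : List (List (String × String)) → List String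
  | [] => []
  | b :: rest =>
      let run := b :: rest.takeWhile (fun y => clB y == clB b)
      (headerB (clB b) b :: run.map lineB) ++ emitB (rest.dropWhile (fun y => clB y == clB b))
termination_by l => l.length
decreasing_by
  simp only [List.length_cons]
  exact Nat.lt_succ_of_le (List.length_dropWhile_le _ _)

def groepeer_bevindingen_py_alt (bevindingen : List (List (String × String))) (norm_filter : Option String) : String :=
  let gesorteerd := PySem.List.sorted2 (bevindingen.filter (keepB norm_filter)) clB volB false
  let regels := emitB gesorteerd
  if regels == [] then "(Geen bevindingen voor deze norm)" else PySem.Str.join "" regels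

-- ===== PRECONDITION & SPEC =====
def pvHasKey (bev : List (String × String)) (k : String) : Bool := bev.any (fun p => p.1 == k)

def pvKept (norm_filter : Option String) (bev : List (String × String)) : Bool :=
  let in_range := (PySem.List.pyRange 4 11 1).any (fun c =>
    PySem.Str.startswith (((bev.find? (fun p => p.1 == "clausule")).map Prod.snd).getD "") (PySem.Int.toStr c))
  if norm_filter == some "9001" then in_range
  else if norm_filter == some "27001" then !in_range
  else true

-- Pre_ excludes findings on which A raises KeyError: every finding needs the key "clausule", and every
-- finding that survives the norm filter needs the other four keys; requiring "clausule_titel" on ALL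
-- surviving findings slightly narrows the domain (A only reads it on the first item of each group).
def Pre_groepeer_bevindingen_py (bevindingen : List (List (String × String))) (norm_filter : Option String) : Prop :=
  ∀ bev ∈ bevindingen, pvHasKey bev "clausule" = true ∧
    (pvKept norm_filter bev = true →
      pvHasKey bev "classificatie" = true ∧ pvHasKey bev "clausule_titel" = true ∧
      pvHasKey bev "herkomst" = true ∧ pvHasKey bev "document_naam" = true ∧
      pvHasKey bev "beschrijving" = true)
instance (bevindingen : List (List (String × String))) (norm_filter : Option String) : Decidable (Pre_groepeer_bevindingen_py bevindingen norm_filter) := by unfold Pre_groepeer_bevindingen_py; infer_instance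

def pvWitness_groepeer_bevindingen_py : (List (List (String × String))) × Option String :=
  ([[("clausule", "4.1"), ("classificatie", "NC"), ("clausule_titel", "Context"),
     ("herkomst", "audit"), ("document_naam", "doc.pdf"), ("beschrijving", "tekst")],
    [("clausule", "10")]], some "27001")

def Spec_groepeer_bevindingen_py (bevindingen : List (List (String × String))) (norm_filter : Option String) (out : String) : Prop := out = groepeer_bevindingen_py_alt bevindingen norm_filter
instance (bevindingen : List (List (String × String))) (norm_filter : Option String) (out : String) : Decidable (Spec_groepeer_bevindingen_py bevindingen norm_filter out) := by unfold Spec_groepeer_bevindingen_py; infer_instance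

-- ===== CLAIM (what is proved, stated in full; the proofs are below) =====
def Claim_equal_groepeer_bevindingen_py : Prop := ∀ (bevindingen : List (List (String × String))) (norm_filter : Option String), Dom_groepeer_bevindingen_py bevindingen norm_filter → Pre_groepeer_bevindingen_py bevindingen norm_filter → Spec_groepeer_bevindingen_py bevindingen norm_filter (groepeer_bevindingen_py bevindingen norm_filter)

-- ===== LEMMAS AND PROOFS =====

-- x's position under the lexicographic (clausule, volgorde) insertion rule (proof-side abbreviations)
def bLex (cl : List (String × String) → String) (vg : List (String × String) → Int)
    (a b : List (String × String)) : Bool :=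
  decide (cl a < cl b) || (!decide (cl b < cl a) && decide (vg a < vg b))
def bV (vg : List (String × String) → Int) (a b : List (String × String)) : Bool :=
  decide (vg a < vg b)
def insStep (d : PySem.Dict String (List (List (String × String)))) (bev : List (String × String)) :
    PySem.Dict String (List (List (String × String))) :=
  d.insert (clB bev) (d.getD (clB bev) [] ++ [bev])

theorem insertBy_append_right {α : Type} (before : α → α → Bool) (x : α) (as bs : List α)
    (h : ∀ y ∈ bs, before x y = true) :
    PySem.List.insertBy before x (as ++ bs) = PySem.List.insertBy before x as ++ bs := by
  induction as with
  | nil =>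
    cases bs with
    | nil => rfl
    | cons y bs' => simp [PySem.List.insertBy, h y (by simp)]
  | cons a as ih =>
    simp only [List.cons_append, PySem.List.insertBy]
    by_cases hb : before x a = true
    · simp [hb]
    · simp [hb, ih]

theorem insertBy_append_left {α : Type} (before : α → α → Bool) (x : α) (as bs : List α)
    (h : ∀ y ∈ as, before x y = false) :
    PySem.List.insertBy before x (as ++ bs) = as ++ PySem.List.insertBy before x bs := by
  induction as with
  | nil => rfl
  | cons a as ih =>
    simp only [List.cons_append, PySem.List.insertBy]
    rw [h a (by simp)]
    simp only [Bool.false_eq_true, if_false, List.cons_inj_right]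
    exact ih (fun y hy => h y (by simp [hy]))

theorem insertBy_congr {α : Type} (before before' : α → α → Bool) (x : α) (l : List α)
    (h : ∀ y ∈ l, before x y = before' x y) :
    PySem.List.insertBy before x l = PySem.List.insertBy before' x l := by
  induction l with
  | nil => rfl
  | cons a l ih =>
    simp only [PySem.List.insertBy]
    rw [h a (by simp)]
    by_cases hb : before' x a = true
    · simp [hb]
    · simp [hb, ih (fun y hy => h y (by simp [hy]))]

theorem flatMap_congr {α β : Type} (l : List α) (f g : α → List β)
    (h : ∀ y ∈ l, f y = g y) : l.flatMap f = l.flatMap g := by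
  induction l with
  | nil => rfl
  | cons a l ih => simp [List.flatMap_cons, h a (by simp), ih (fun y hy => h y (by simp [hy]))]

theorem insert_flatMap_mem (cl : List (String × String) → String) (vg : List (String × String) → Int)
    (ks : List String) (g : String → List (List (String × String))) (x : List (String × String))
    (hsort : ks.Pairwise (· < ·))
    (hkey : ∀ k ∈ ks, ∀ y ∈ g k, cl y = k)
    (hmem : cl x ∈ ks) :
    PySem.List.insertBy (bLex cl vg) x (ks.flatMap g) =
      ks.flatMap (fun k => if k = cl x then PySem.List.insertBy (bV vg) x (g k) else g k) := by
  induction ks with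
  | nil => simp at hmem
  | cons k ks ih =>
    rw [List.pairwise_cons] at hsort
    obtain ⟨hlt, hp⟩ := hsort
    by_cases hk : k = cl x
    · subst hk
      simp only [List.flatMap_cons]
      rw [insertBy_append_right]
      · rw [insertBy_congr (bLex cl vg) (bV vg) x (g (cl x))
          (fun y hy => by
            have hcy := hkey (cl x) (by simp) y hy
            simp [bLex, bV, hcy])]
        rw [if_pos trivial, List.append_cancel_left_eq]
        apply flatMap_congr
        intro k' hk'
        have : k' ≠ cl x := ne_of_gt (hlt k' hk')
        rw [if_neg this]
      · intro y hy
        simp only [List.mem_flatMap] at hy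
        obtain ⟨k', hk', hyk⟩ := hy
        have hcy : cl y = k' := hkey k' (by simp [hk']) y hyk
        have : cl x < cl y := by rw [hcy]; exact hlt k' hk'
        simp [bLex, this]
    · have hmem' : cl x ∈ ks := by
        rcases List.mem_cons.1 hmem with h | h
        · exact absurd h.symm hk
        · exact h
      have hklt : k < cl x := hlt _ hmem'
      simp only [List.flatMap_cons]
      rw [insertBy_append_left]
      · rw [ih hp (fun k' hk' => hkey k' (by simp [hk'])) hmem']
        simp [if_neg hk]
      · intro y hy
        have hcy : cl y = k := hkey k (by simp) y hy
        have h1 : ¬ (cl x < cl y) := by rw [hcy]; exact not_lt_of_gt hklt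
        have h2 : cl y < cl x := by rw [hcy]; exact hklt
        simp [bLex, h1, h2]

theorem insert_flatMap_not_mem (cl : List (String × String) → String) (vg : List (String × String) → Int)
    (ks : List String) (g : String → List (List (String × String))) (x : List (String × String))
    (hsort : ks.Pairwise (· < ·))
    (hkey : ∀ k ∈ ks, ∀ y ∈ g k, cl y = k)
    (hmem : cl x ∉ ks) :
    PySem.List.insertBy (bLex cl vg) x (ks.flatMap g) =
      (PySem.List.insertBy (fun a b => decide ((a : String) < b)) (cl x) ks).flatMap
        (fun k => if k = cl x then [x] else g k) := by
  induction ks with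
  | nil => simp [PySem.List.insertBy]
  | cons k ks ih =>
    rw [List.pairwise_cons] at hsort
    obtain ⟨hlt, hp⟩ := hsort
    have hkne : k ≠ cl x := fun h => hmem (by simp [h])
    rcases lt_trichotomy (cl x) k with hc | hc | hc
    · -- cl x < k : x goes in front of everything
      have hall : ∀ y ∈ List.flatMap g (k :: ks), bLex cl vg x y = true := by
        intro y hy
        simp only [List.flatMap_cons] at hy
        rcases List.mem_append.1 hy with hy | hy
        · have hcy := hkey k (by simp) y hy
          have : cl x < cl y := by rw [hcy]; exact hc
          simp [bLex, this]
        · simp only [List.mem_flatMap] at hy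
          obtain ⟨k', hk', hyk⟩ := hy
          have hcy : cl y = k' := hkey k' (by simp [hk']) y hyk
          have : cl x < cl y := by rw [hcy]; exact lt_trans hc (hlt k' hk')
          simp [bLex, this]
      have hfront := insertBy_append_right (bLex cl vg) x [] _ hall
      simp only [List.nil_append] at hfront
      rw [hfront]
      simp only [PySem.List.insertBy, decide_eq_true_eq, if_pos hc]
      simp only [List.flatMap_cons, if_true, List.cons_append, List.nil_append,
        List.cons_inj_right]
      rw [← List.flatMap_cons, ← List.flatMap_cons (f := fun k => if k = cl x then [x] else g k)]
      apply flatMap_congr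
      intro k' hk'
      have : k' ≠ cl x := fun h => hmem (h ▸ hk')
      rw [if_neg this]
    · exact absurd hc.symm hkne
    · -- k < cl x : pass over the first chunk
      simp only [List.flatMap_cons]
      rw [insertBy_append_left _ _ _ _ (fun y hy => by
        have hcy : cl y = k := hkey k (by simp) y hy
        have h1 : ¬ (cl x < cl y) := by rw [hcy]; exact not_lt_of_gt hc
        have h2 : cl y < cl x := by rw [hcy]; exact hc
        simp [bLex, h1, h2])]
      rw [ih hp (fun k' hk' => hkey k' (by simp [hk'])) (fun h => hmem (by simp [h]))]
      simp only [PySem.List.insertBy, decide_eq_true_eq, if_neg (not_lt_of_gt hc)]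
      simp [if_neg hkne]


theorem sorted2_append_singleton (cl : List (String × String) → String) (vg : List (String × String) → Int) (l : List (List (String × String))) (x : List (String × String)) :
    PySem.List.sorted2 (l ++ [x]) cl vg false =
      PySem.List.insertBy (bLex cl vg) x (PySem.List.sorted2 l cl vg false) := by
  simp only [PySem.List.sorted2, List.foldl_append, List.foldl_cons, List.foldl_nil,
    Bool.false_eq_true, if_false]
  rfl

theorem sorted_append_singleton {α κ : Type} [LT κ] [DecidableLT κ]
    (key : α → κ) (l : List α) (a : α) :
    PySem.List.sorted (l ++ [a]) key false =
      PySem.List.insertBy (fun p q => decide (key p < key q)) a (PySem.List.sorted l key false) := by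
  simp [PySem.List.sorted, List.foldl_append]

theorem dedup_append_singleton {α : Type} [BEq α] (ys : List α) (a : α) :
    PySem.List.dedup (ys ++ [a]) = PySem.Set.add (PySem.List.dedup ys) a := by
  simp only [PySem.List.dedup_eq_ofList, PySem.Set.ofList_eq_foldl, List.foldl_append, List.foldl_cons, List.foldl_nil]

theorem decomp (cl : List (String × String) → String) (vg : List (String × String) → Int) (l : List (List (String × String))) :
    PySem.List.sorted2 l cl vg false =
      (PySem.List.sorted (PySem.List.dedup (l.map cl)) (fun x => x) false).flatMap
        (fun k => PySem.List.sorted (l.filter (fun b => cl b == k)) vg false) := by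
  induction l using List.reverseRecOn with
  | nil => simp [PySem.List.sorted2, PySem.List.dedup, PySem.List.sorted]
  | append_singleton l x ih =>
    rw [sorted2_append_singleton, ih]
    have hsort : (PySem.List.sorted (PySem.List.dedup (l.map cl)) (fun x => x) false).Pairwise (· < ·) := by
      simpa using PySem.List.sorted_ofList_pairwise_lt (xs := l.map cl)
    have hkey : ∀ k ∈ PySem.List.sorted (PySem.List.dedup (l.map cl)) (fun x => x) false,
        ∀ y ∈ PySem.List.sorted (l.filter (fun b => cl b == k)) vg false, cl y = k := by
      intro k _ y hy
      rw [PySem.List.mem_sorted] at hy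
      have := List.of_mem_filter hy
      simpa using this
    have hfilterx : ∀ k, (l ++ [x]).filter (fun b => cl b == k) =
        l.filter (fun b => cl b == k) ++ (if cl x = k then [x] else []) := by
      intro k
      rw [List.filter_append]
      by_cases h : cl x = k <;> simp [h]
    by_cases hmem : cl x ∈ PySem.List.sorted (PySem.List.dedup (l.map cl)) (fun x => x) false
    · rw [insert_flatMap_mem cl vg _ _ x hsort hkey hmem]
      have hD : cl x ∈ PySem.List.dedup (l.map cl) := (PySem.List.mem_sorted _ _ _ _).1 hmem
      have hadd : PySem.List.dedup ((l ++ [x]).map cl) = PySem.List.dedup (l.map cl) := by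
        rw [List.map_append, List.map_singleton, dedup_append_singleton]
        simp only [PySem.Set.add, PySem.Set.contains]
        rw [if_pos (by simpa using hD)]
      rw [hadd]
      apply flatMap_congr
      intro k hk
      by_cases h : k = cl x
      · subst h
        rw [if_pos rfl, hfilterx, if_pos rfl, sorted_append_singleton]
        rfl
      · rw [if_neg h, hfilterx, if_neg (fun hh => h hh.symm), List.append_nil]
    · rw [insert_flatMap_not_mem cl vg _ _ x hsort hkey hmem]
      have hD : cl x ∉ PySem.List.dedup (l.map cl) := fun h =>
        hmem ((PySem.List.mem_sorted _ _ _ _).2 h)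
      have hadd : PySem.List.dedup ((l ++ [x]).map cl) = PySem.List.dedup (l.map cl) ++ [cl x] := by
        rw [List.map_append, List.map_singleton, dedup_append_singleton]
        simp only [PySem.Set.add, PySem.Set.contains]
        rw [if_neg (by simpa using hD)]
      rw [hadd, sorted_append_singleton]
      apply flatMap_congr
      intro k hk
      rw [PySem.List.mem_insertBy] at hk
      by_cases h : k = cl x
      · subst h
        rw [if_pos rfl, hfilterx, if_pos rfl]
        have hnil : l.filter (fun b => cl b == cl x) = [] := by
          rw [List.filter_eq_nil_iff]
          intro b hb hbe
          exact hD (by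
            rw [PySem.List.mem_dedup]
            exact List.mem_map.2 ⟨b, hb, by simpa using hbe⟩)
        rw [hnil, List.nil_append]
        simp [PySem.List.sorted, PySem.List.insertBy]
      · rcases hk with hk | hk
        · exact absurd hk h
        · rw [if_neg h, hfilterx, if_neg (fun hh => h hh.symm), List.append_nil]


theorem keys_insert {κ ν : Type} [BEq κ] [LawfulBEq κ] (d : PySem.Dict κ ν) (k : κ) (v : ν) :
    (d.insert k v).keys = if d.contains k = true then d.keys else d.keys ++ [k] := by
  by_cases h : d.contains k = true
  · simp only [PySem.Dict.insert, if_pos h, PySem.Dict.keys, List.map_map]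
    apply List.map_congr_left
    intro p hp
    by_cases hb : (p.1 == k) = true
    · simp [Function.comp, (eq_of_beq hb).symm]
    · simp [Function.comp, hb]
  · simp [PySem.Dict.insert, if_neg h, PySem.Dict.keys]

theorem set_contains_keys {κ ν : Type} [BEq κ] [LawfulBEq κ] (d : PySem.Dict κ ν) (k : κ) :
    PySem.Set.contains d.keys k = d.contains k := by
  cases d with
  | mk items =>
    rw [Bool.eq_iff_iff]
    simp only [PySem.Set.contains, PySem.Dict.contains, PySem.Dict.keys, List.any_eq_true,
      List.contains_iff_mem, List.mem_map, beq_iff_eq]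

theorem getD_foldl_insStep (l : List (List (String × String)))
    (d : PySem.Dict String (List (List (String × String)))) (k : String) :
    (l.foldl insStep d).getD k [] = d.getD k [] ++ l.filter (fun b => clB b == k) := by
  induction l generalizing d with
  | nil => simp
  | cons b l ih =>
    rw [List.foldl_cons, ih]
    simp only [insStep, PySem.Dict.getD_insert]
    by_cases h : clB b = k
    · subst h
      simp
    · rw [if_neg (fun hh => h hh.symm)]
      simp [h]

theorem keys_foldl_insStep (l : List (List (String × String)))
    (d : PySem.Dict String (List (List (String × String)))) :
    (l.foldl insStep d).keys = l.foldl (fun ks b => PySem.Set.add ks (clB b)) d.keys := by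
  induction l generalizing d with
  | nil => rfl
  | cons b l ih =>
    rw [List.foldl_cons, ih, List.foldl_cons]
    congr 1
    rw [insStep, keys_insert, PySem.Set.add, set_contains_keys]

theorem takeWhile_append_all {α : Type} (p : α → Bool) (t rest : List α)
    (h : ∀ y ∈ t, p y = true) :
    (t ++ rest).takeWhile p = t ++ rest.takeWhile p := by
  induction t with
  | nil => rfl
  | cons a t ih =>
    simp only [List.cons_append, List.takeWhile_cons, h a (by simp), if_true]
    rw [ih (fun y hy => h y (by simp [hy]))]

theorem dropWhile_append_all {α : Type} (p : α → Bool) (t rest : List α)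
    (h : ∀ y ∈ t, p y = true) :
    (t ++ rest).dropWhile p = rest.dropWhile p := by
  induction t with
  | nil => rfl
  | cons a t ih =>
    simp only [List.cons_append, List.dropWhile_cons, h a (by simp), if_true]
    exact ih (fun y hy => h y (by simp [hy]))

theorem emit_flatMap (ks : List String) (g : String → List (List (String × String)))
    (hkey : ∀ k ∈ ks, ∀ y ∈ g k, clB y = k)
    (hne : ∀ k ∈ ks, g k ≠ [])
    (hadj : ks.Pairwise (· ≠ ·)) :
    emitB (ks.flatMap g) =
      ks.flatMap (fun k => headerB k ((g k).headD []) :: (g k).map lineB) := by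
  induction ks with
  | nil => simp [emitB]
  | cons k ks ih =>
    rw [List.pairwise_cons] at hadj
    obtain ⟨hne1, hadj⟩ := hadj
    obtain ⟨b, t, hbt⟩ : ∃ b t, g k = b :: t := by
      cases hgk : g k with
      | nil => exact absurd hgk (hne k (by simp))
      | cons b t => exact ⟨b, t, rfl⟩
    have hclb : clB b = k := hkey k (by simp) b (by simp [hbt])
    have htk : ∀ y ∈ t, (clB y == clB b) = true := by
      intro y hy
      have := hkey k (by simp) y (by simp [hbt, hy])
      simp [this, hclb]
    have hrest : ∀ y, (∃ k' ∈ ks, y ∈ g k') → (clB y == clB b) = false := by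
      intro y ⟨k', hk', hyk⟩
      have := hkey k' (by simp [hk']) y hyk
      simp [this, hclb]
      exact fun h => (hne1 k' hk') h.symm
    have htake : (t ++ List.flatMap g ks).takeWhile (fun y => clB y == clB b) = t := by
      rw [takeWhile_append_all _ _ _ htk]
      cases hks : ks with
      | nil => simp
      | cons k2 ks2 =>
        obtain ⟨b2, t2, hbt2⟩ : ∃ b2 t2, g k2 = b2 :: t2 := by
          cases hgk : g k2 with
          | nil => exact absurd hgk (hne k2 (by simp [hks]))
          | cons b2 t2 => exact ⟨b2, t2, rfl⟩
        simp only [List.flatMap_cons, hbt2, List.cons_append, List.takeWhile_cons]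
        rw [hrest b2 ⟨k2, by simp [hks], by simp [hbt2]⟩]
        simp
    have hdrop : (t ++ List.flatMap g ks).dropWhile (fun y => clB y == clB b) = List.flatMap g ks := by
      rw [dropWhile_append_all _ _ _ htk]
      cases hks : ks with
      | nil => simp
      | cons k2 ks2 =>
        obtain ⟨b2, t2, hbt2⟩ : ∃ b2 t2, g k2 = b2 :: t2 := by
          cases hgk : g k2 with
          | nil => exact absurd hgk (hne k2 (by simp [hks]))
          | cons b2 t2 => exact ⟨b2, t2, rfl⟩
        simp only [List.flatMap_cons, hbt2, List.cons_append, List.dropWhile_cons]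
        rw [hrest b2 ⟨k2, by simp [hks], by simp [hbt2]⟩]
        simp
    have hflat : List.flatMap g (k :: ks) = b :: (t ++ List.flatMap g ks) := by
      simp [hbt]
    rw [hflat, emitB, htake, hdrop,
      ih (fun k' hk' => hkey k' (by simp [hk'])) (fun k' hk' => hne k' (by simp [hk'])) hadj]
    simp [hbt, hclb]

theorem pyGetD_zero_headD (items : List (List (String × String))) :
    PySem.List.pyGetD items 0 [] = items.headD [] := by
  cases items <;> simp [PySem.List.pyGetD, PySem.List.pyGet?, PySem.List.pyIdx?]

theorem stepA_eq (nf : Option String) (d : PySem.Dict String (List (List (String × String))))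
    (bev : List (String × String)) :
    (let clausule := dget bev "clausule"
     if nf == some "9001" && !(startsRangeA clausule) then d
     else if nf == some "27001" && startsRangeA clausule then d
     else d.insert clausule (d.getD clausule [] ++ [bev]))
    = if keepB nf bev then insStep d bev else d := by
  simp only [keepB, show startsRangeB = startsRangeA from rfl, insStep, clB]
  by_cases h9 : nf = some "9001"
  · subst h9
    by_cases sr : startsRangeA (dget bev "clausule") = true <;> simp [sr]
  · by_cases h27 : nf = some "27001"
    · subst h27
      by_cases sr : startsRangeA (dget bev "clausule") = true <;> simp [sr]
    · simp [h9, h27]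

-- ===== VERDICT (by name: the statement is the Claim_ definition above) =====
theorem groepeer_bevindingen_py_spec : Claim_equal_groepeer_bevindingen_py := by
  unfold Claim_equal_groepeer_bevindingen_py
  intro bevs nf _hdom _hpre
  unfold Spec_groepeer_bevindingen_py
  simp only [groepeer_bevindingen_py, groepeer_bevindingen_py_alt]
  -- A's loop = grouping fold over the filtered list
  rw [show (fun (d : PySem.Dict String (List (List (String × String)))) bev =>
      let clausule := dget bev "clausule"
      if nf == some "9001" && !(startsRangeA clausule) then d
      else if nf == some "27001" && startsRangeA clausule then d
      else d.insert clausule (d.getD clausule [] ++ [bev]))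
    = (fun d bev => if keepB nf bev then insStep d bev else d) from
      funext fun d => funext fun bev => stepA_eq nf d bev]
  rw [PySem.List.foldl_if_eq_foldl_filter (keepB nf) insStep bevs PySem.Dict.empty]
  -- name the filtered list
  set kept := bevs.filter (keepB nf) with hkept
  -- the grouping dict's keys and groups
  have hkeys : (kept.foldl insStep PySem.Dict.empty).keys = PySem.List.dedup (kept.map clB) := by
    rw [keys_foldl_insStep]
    show kept.foldl (fun ks b => PySem.Set.add ks (clB b)) [] = _
    rw [PySem.List.dedup, PySem.Set.ofList_eq_foldl, ← List.foldl_map]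
  have hgroup : ∀ k, (kept.foldl insStep PySem.Dict.empty).getD k [] =
      kept.filter (fun b => clB b == k) := by
    intro k
    rw [getD_foldl_insStep]
    rfl
  rw [hkeys]
  -- flatten A's nested append loops
  rw [show (fun (regels : List String) cid =>
      let items := PySem.List.sorted ((kept.foldl insStep PySem.Dict.empty).getD cid [])
        (fun b => VOLGORDE.getD (dget b "classificatie") 9) false
      let regels := regels ++ [headerA cid items]
      items.foldl (fun regels bev => regels ++ [lineA bev]) regels)
    = (fun regels cid => regels ++
        (headerA cid (PySem.List.sorted (kept.filter (fun b => clB b == cid)) volB false) ::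
         (PySem.List.sorted (kept.filter (fun b => clB b == cid)) volB false).map lineA)) from by
      funext regels cid
      show (PySem.List.sorted ((kept.foldl insStep PySem.Dict.empty).getD cid [])
          (fun b => VOLGORDE.getD (dget b "classificatie") 9) false).foldl
          (fun regels bev => regels ++ [lineA bev])
          (regels ++ [headerA cid (PySem.List.sorted ((kept.foldl insStep PySem.Dict.empty).getD cid [])
            (fun b => VOLGORDE.getD (dget b "classificatie") 9) false)]) = _
      rw [PySem.List.foldl_append_singleton_eq_map, hgroup cid, List.append_assoc]
      rfl]
  rw [PySem.List.foldl_append_eq_flatMap, List.nil_append]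
  -- B's sorted2 decomposes into per-clausule stably sorted chunks
  rw [decomp clB volB kept]
  -- facts about the chunk family
  have hsortlt : (PySem.List.sorted (PySem.List.dedup (kept.map clB)) (fun x => x) false).Pairwise (· < ·) := by
    simpa using PySem.List.sorted_ofList_pairwise_lt (xs := kept.map clB)
  have hkey : ∀ k ∈ PySem.List.sorted (PySem.List.dedup (kept.map clB)) (fun x => x) false,
      ∀ y ∈ PySem.List.sorted (kept.filter (fun b => clB b == k)) volB false, clB y = k := by
    intro k _ y hy
    rw [PySem.List.mem_sorted] at hy
    have := List.of_mem_filter hy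
    simpa using this
  have hne : ∀ k ∈ PySem.List.sorted (PySem.List.dedup (kept.map clB)) (fun x => x) false,
      PySem.List.sorted (kept.filter (fun b => clB b == k)) volB false ≠ [] := by
    intro k hk
    rw [Ne, PySem.List.sorted_eq_nil_iff, List.filter_eq_nil_iff]
    intro hall
    rw [PySem.List.mem_sorted, PySem.List.mem_dedup] at hk
    obtain ⟨b, hb, rfl⟩ := List.mem_map.1 hk
    exact hall b hb (by simp)
  rw [emit_flatMap _ _ hkey hne (hsortlt.imp fun h => ne_of_lt h)]
  -- the two flatMap bodies agree
  rw [flatMap_congr _ _ _ (fun k hk => ?_)]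
  obtain ⟨b, t, hbt⟩ : ∃ b t, PySem.List.sorted (kept.filter (fun b => clB b == k)) volB false = b :: t := by
    cases hgk : PySem.List.sorted (kept.filter (fun b => clB b == k)) volB false with
    | nil => exact absurd hgk (hne k hk)
    | cons b t => exact ⟨b, t, rfl⟩
  rw [hbt]
  simp only [headerA, pyGetD_zero_headD, List.headD_cons]
  rfl
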